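-- pv_equiv track=rewrite | github.com/chrs-myrs/livespec | regenerate_prompts.py | extract_phase
-- ===== SOURCE A (Python) =====
-- def extract_phase(output_path):
--     """Extract phase from output path."""
--     parts = output_path.split('/')
--     if 'utils' in parts:
--         return 'utils'
--     for part in parts:
--         if part.startswith('0-') or part.startswith('1-') or part.startswith('2-') or part.startswith('3-') or part.startswith('4-'):
--             return part
--     return None
-- ===== SOURCE B (Python) =====
-- def extract_phase(output_path):
--     """Extract phase from output path (single character scan, no split list)."""
--     best = None
--     seg_start = 0
--     n = len(output_path)
--     for i in range(n + 1):
--         if i == n or output_path[i] == '/':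
--             seg = output_path[seg_start:i]
--             if seg == 'utils':
--                 return 'utils'
--             if best is None and len(seg) >= 2 and seg[0] in '01234' and seg[1] == '-':
--                 best = seg
--             seg_start = i + 1
--     return best
-- ===== Notes on version B (the rewrite author's own statement) =====
-- stated objective: alternative
-- what changed: Replaces split-into-list plus a membership test and a second loop by a single left-to-right character scan that finalizes each '/'-delimited segment in place, returning 'utils' immediately and keeping the first phase segment in an accumulator.
import Mathlib
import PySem

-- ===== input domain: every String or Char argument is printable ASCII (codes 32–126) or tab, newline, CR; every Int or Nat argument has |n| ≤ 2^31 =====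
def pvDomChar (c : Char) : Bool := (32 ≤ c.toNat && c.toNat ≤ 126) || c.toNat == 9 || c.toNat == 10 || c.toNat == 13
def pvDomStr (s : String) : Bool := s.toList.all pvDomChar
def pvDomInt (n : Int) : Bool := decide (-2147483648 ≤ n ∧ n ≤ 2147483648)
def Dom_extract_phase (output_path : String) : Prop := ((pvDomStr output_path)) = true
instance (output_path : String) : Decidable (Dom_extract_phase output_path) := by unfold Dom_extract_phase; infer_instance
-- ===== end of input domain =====

-- B replaces A's split-into-list + membership test + second loop by one character scan
-- that finalizes each '/'-delimited segment in place (objective: alternative, same cost).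

-- ===== PORT A =====
def pvUtils : List Char := ['u', 't', 'i', 'l', 's']

-- the 'for part in parts' loop of A: first part starting with '0-' … '4-'
def pvALoop : List (List Char) → Option (List Char)
  | [] => none
  | p :: ps =>
      if (PySem.Chars.startswith p ['0', '-'] || PySem.Chars.startswith p ['1', '-'] ||
          PySem.Chars.startswith p ['2', '-'] || PySem.Chars.startswith p ['3', '-'] ||
          PySem.Chars.startswith p ['4', '-']) then some p else pvALoop ps

def extract_phase (output_path : String) : Option String :=
  -- output_path.split('/'): sep is the nonempty literal '/', so Python never raises; split? = some (splitOn)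
  let parts := PySem.Chars.splitOn output_path.toList ['/']
  if pvUtils ∈ parts then some "utils"
  else (pvALoop parts).map String.ofList

-- ===== PORT B =====
-- seg[0] in '01234' and seg[1] == '-' and len(seg) >= 2
def pvPhaseB (seg : List Char) : Bool :=
  match seg with
  | a :: b :: _ => decide (a ∈ ['0', '1', '2', '3', '4']) && (b == '-')
  | _ => false

-- B's single scan: cur is the current segment (reversed accumulator), best the first phase seen
def pvBLoop : List Char → List Char → Option (List Char) → Option (List Char)
  | [], cur, best =>
      let seg := cur.reverse
      if seg = ['u', 't', 'i', 'l', 's'] then some ['u', 't', 'i', 'l', 's']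
      else
        match best with
        | some b => some b
        | none => if pvPhaseB seg then some seg else none
  | c :: rest, cur, best =>
      if c = '/' then
        let seg := cur.reverse
        if seg = ['u', 't', 'i', 'l', 's'] then some ['u', 't', 'i', 'l', 's']
        else
          pvBLoop rest []
            (match best with
             | some b => some b
             | none => if pvPhaseB seg then some seg else none)
      else pvBLoop rest (c :: cur) best

def extract_phase_alt (output_path : String) : Option String :=
  (pvBLoop output_path.toList [] none).map String.ofList

-- ===== PRECONDITION & SPEC =====
def Spec_extract_phase (output_path : String) (out : Option String) : Prop := out = extract_phase_alt output_path
instance (output_path : String) (out : Option String) : Decidable (Spec_extract_phase output_path out) := by unfold Spec_extract_phase; infer_instance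

-- ===== CLAIM (what is proved, stated in full; the proofs are below) =====
def Claim_equal_extract_phase : Prop := ∀ (output_path : String), Dom_extract_phase output_path → Spec_extract_phase output_path (extract_phase output_path)

-- ===== LEMMAS AND PROOFS =====

-- structural single-char split on '/', used only by the proofs
def pvConsPre (p : List Char) : List (List Char) → List (List Char)
  | [] => [p]
  | s :: ss => (p ++ s) :: ss

def pvSplit : List Char → List (List Char)
  | [] => [[]]
  | c :: t => if c = '/' then [] :: pvSplit t else pvConsPre [c] (pvSplit t)

lemma pvConsPre_ne_nil (p : List Char) (ps : List (List Char)) : pvConsPre p ps ≠ [] := by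
  cases ps <;> simp [pvConsPre]

lemma pvSplit_ne_nil (l : List Char) : pvSplit l ≠ [] := by
  cases l with
  | nil => simp [pvSplit]
  | cons c t =>
      simp only [pvSplit]
      split
      · simp
      · exact pvConsPre_ne_nil _ _

lemma pvSplitOn_go_eq (fuel : Nat) : ∀ (l cur : List Char) (acc : List (List Char)),
    l.length < fuel →
    PySem.Chars.splitOn.go ['/'] fuel l cur acc = acc.reverse ++ pvConsPre cur.reverse (pvSplit l) := by
  induction fuel with
  | zero => intro l cur acc h; omega
  | succ f ih =>
      intro l cur acc h
      cases l with
      | nil => simp [PySem.Chars.splitOn.go, pvSplit, pvConsPre]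
      | cons c rest =>
          by_cases hc : c = '/'
          · subst hc
            have : List.isPrefixOf ['/'] ('/' :: rest) = true := by simp [List.isPrefixOf]
            simp only [PySem.Chars.splitOn.go, this, if_pos]
            have hd : List.drop (['/'] : List Char).length ('/' :: rest) = rest := rfl
            rw [hd, ih rest [] (cur.reverse :: acc) (by simpa using Nat.lt_of_succ_lt_succ h)]
            have e2 : pvSplit ('/' :: rest) = [] :: pvSplit rest := by simp [pvSplit]
            rw [e2]
            cases hs : pvSplit rest with
            | nil => exact absurd hs (pvSplit_ne_nil rest)
            | cons s ss => simp [pvConsPre]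
          · have : List.isPrefixOf ['/'] (c :: rest) = false := by
              simp [List.isPrefixOf]; intro hh; exact absurd hh.symm hc
            simp only [PySem.Chars.splitOn.go, this, Bool.false_eq_true, if_false]
            rw [ih rest (c :: cur) acc (by simpa using Nat.lt_of_succ_lt_succ h)]
            have hne := pvSplit_ne_nil rest
            cases hs : pvSplit rest with
            | nil => exact absurd hs hne
            | cons s ss => simp [pvSplit, hc, hs, pvConsPre]

lemma pvSplitOn_eq (l : List Char) : PySem.Chars.splitOn l ['/'] = pvSplit l := by
  unfold PySem.Chars.splitOn
  rw [pvSplitOn_go_eq (l.length + 1) l [] [] (Nat.lt_succ_self _)]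
  have hne := pvSplit_ne_nil l
  cases hs : pvSplit l with
  | nil => exact absurd hs hne
  | cons s ss => simp [pvConsPre]

-- A's startswith chain coincides with B's two-character test
lemma pvPhase_eq (p : List Char) :
    (PySem.Chars.startswith p ['0', '-'] || PySem.Chars.startswith p ['1', '-'] ||
     PySem.Chars.startswith p ['2', '-'] || PySem.Chars.startswith p ['3', '-'] ||
     PySem.Chars.startswith p ['4', '-']) = pvPhaseB p := by
  match p with
  | [] => simp [PySem.Chars.startswith, List.isPrefixOf, pvPhaseB]
  | [a] => simp [PySem.Chars.startswith, List.isPrefixOf, pvPhaseB]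
  | a :: b :: t =>
      simp only [PySem.Chars.startswith, List.isPrefixOf, pvPhaseB]
      rw [Bool.eq_iff_iff]
      simp [Bool.beq_comm]
      tauto

-- the first phase segment, B-style condition
def pvFirst : List (List Char) → Option (List Char)
  | [] => none
  | p :: ps => if pvPhaseB p then some p else pvFirst ps

-- common evaluation of both programs on the segment list
def pvFinish (ps : List (List Char)) (best : Option (List Char)) : Option (List Char) :=
  if pvUtils ∈ ps then some pvUtils
  else
    match best with
    | some b => some b
    | none => pvFirst ps

lemma pvALoop_eq_first (ps : List (List Char)) : pvALoop ps = pvFirst ps := by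
  induction ps with
  | nil => rfl
  | cons p t ih => simp only [pvALoop, pvFirst, pvPhase_eq, ih]

lemma pvFinish_cons (seg : List Char) (ps : List (List Char)) (best : Option (List Char)) :
    pvFinish (seg :: ps) best =
      if seg = pvUtils then some pvUtils
      else
        pvFinish ps
          (match best with
           | some b => some b
           | none => if pvPhaseB seg then some seg else none) := by
  by_cases hu : seg = pvUtils
  · simp [pvFinish, hu]
  · have h1 : ¬ pvUtils = seg := fun h => hu h.symm
    rw [if_neg hu]
    by_cases hm : pvUtils ∈ ps
    · cases best <;> simp [pvFinish, hm, h1]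
    · cases best with
      | some b => simp [pvFinish, hm, h1]
      | none => cases hp : pvPhaseB seg <;> simp [pvFinish, pvFirst, hm, h1, hp]

lemma pvBLoop_eq (cs : List Char) : ∀ (cur : List Char) (best : Option (List Char)),
    pvBLoop cs cur best = pvFinish (pvConsPre cur.reverse (pvSplit cs)) best := by
  induction cs with
  | nil =>
      intro cur best
      have e2 : pvConsPre cur.reverse (pvSplit []) = [cur.reverse] := by
        simp [pvSplit, pvConsPre]
      rw [e2]
      show (if cur.reverse = pvUtils then some pvUtils
            else
              match best with
              | some b => some b
              | none => if pvPhaseB cur.reverse then some cur.reverse else none) = _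
      by_cases hu : cur.reverse = pvUtils
      · simp [pvFinish, hu]
      · have h1 : ¬ pvUtils = cur.reverse := fun h => hu h.symm
        cases best <;> simp [pvFinish, pvFirst, hu, h1]
  | cons c rest ih =>
      intro cur best
      by_cases hc : c = '/'
      · subst hc
        have e1 : pvBLoop ('/' :: rest) cur best =
            if cur.reverse = pvUtils then some pvUtils
            else pvBLoop rest []
              (match best with
               | some b => some b
               | none => if pvPhaseB cur.reverse then some cur.reverse else none) := by
          simp [pvBLoop, pvUtils]
        have e2 : pvConsPre cur.reverse (pvSplit ('/' :: rest)) = cur.reverse :: pvSplit rest := by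
          simp [pvSplit, pvConsPre]
        rw [e1, e2, pvFinish_cons]
        by_cases hu : cur.reverse = pvUtils
        · simp [hu]
        · rw [if_neg hu, if_neg hu, ih]
          have hne := pvSplit_ne_nil rest
          cases hs : pvSplit rest with
          | nil => exact absurd hs hne
          | cons s ss => simp [pvConsPre]
      · simp only [pvBLoop, ih, pvSplit, if_neg hc]
        have hne := pvSplit_ne_nil rest
        cases hs : pvSplit rest with
        | nil => exact absurd hs hne
        | cons s ss => simp [pvConsPre]

lemma pvA_eval (s : String) :
    extract_phase s = (pvFinish (pvSplit s.toList) none).map String.ofList := by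
  unfold extract_phase
  rw [pvSplitOn_eq]
  by_cases hm : pvUtils ∈ pvSplit s.toList
  · simp only [hm, if_pos, pvFinish]
    rfl
  · simp [hm, pvFinish, pvALoop_eq_first]

lemma pvB_eval (s : String) :
    extract_phase_alt s = (pvFinish (pvSplit s.toList) none).map String.ofList := by
  unfold extract_phase_alt
  rw [pvBLoop_eq]
  have hne := pvSplit_ne_nil s.toList
  cases hs : pvSplit s.toList with
  | nil => exact absurd hs hne
  | cons p ps => simp [pvConsPre]

-- ===== VERDICT (by name: the statement is the Claim_ definition above) =====
theorem extract_phase_spec : Claim_equal_extract_phase := by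
  intro output_path _
  unfold Spec_extract_phase
  rw [pvA_eval, pvB_eval]
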